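-- pv_equiv track=rewrite | github.com/afairless/peanuts-plotting-prominences | character_appear.py | find_two_columns_to_merge
-- ===== SOURCE A (Python) =====
-- def find_two_columns_to_merge(column_names, merge_dict):
--     '''
--     searches in 'column_names' for the names of two columns to be merged
--     a column should be merged if it's a key in 'merge_dict'; the key's value
--         is the new name for the merged column
--     if the new name is itself already a column, the column should be merged
--         with this existing 'new name' column
--     if the new name is not already a column, then search for a 2nd column that
--         has the same new name listed as a value in 'merge_dict' as the 1st
--         column did; if such a 2nd column is found, merge the 1st and 2nd columns
--         under the shared new name
--     returns the names of the two columns to be merged and the new name for the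
--         merged column
--     '''
--
--     for i in range(len(column_names)):
--
--         col1_name = column_names[i]
--
--         if col1_name not in merge_dict:
--             continue
--
--         # find a column in 'merge_dict' to be merged; identify its new, merged name
--         col1_new_name = merge_dict[col1_name]
--
--         # if the new name is already a column
--         if col1_new_name in column_names:
--
--             # merge the two columns together under the new name
--             return(col1_name, col1_new_name, col1_new_name)
--
--         # if the new name is not already a column
--         else:
--
--             # find a 2nd column...
--             for j in range(i + 1, len(column_names)):
--
--                 col2_name = column_names[j]
--
--                 # ...that should be merged...
--                 if col2_name in merge_dict:
--
--                     col2_new_name = merge_dict[col2_name]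
--
--                     # ...and has same new name as the 1st column
--                     if col1_new_name == col2_new_name:
--
--                         # merge the two columns together under the shared new name
--                         return(col1_name, col2_name, col1_new_name)
--
--                     else:
--                         continue
--
--     # if no columns are found, return empty strings
--     return('', '', '')
-- ===== SOURCE B (Python) =====
-- def find_two_columns_to_merge(column_names, merge_dict):
--     '''
--     Re-implementation: a set for column-name membership and a precomputed
--     index grouping key-columns by their new (merged) name, so no inner
--     scan per candidate column is needed.
--     '''
--     colset = set(column_names)
--     pairs = [(merge_dict[c], c) for c in column_names if c in merge_dict]
--     groups = {}
--     for new_name, c in pairs: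
--         groups.setdefault(new_name, []).append(c)
--     for new_name, c in pairs:
--         if new_name in colset:
--             return (c, new_name, new_name)
--         g = groups[new_name]
--         if len(g) >= 2:
--             return (g[0], g[1], new_name)
--     return ('', '', '')
-- ===== Notes on version B (the rewrite author's own statement) =====
-- stated objective: alternative
-- what changed: Replaced A's nested scan (a list-membership test plus an inner scan for a later partner column at every candidate) by a set for column-name membership and a dict built once that groups key-columns by their new name; a single scan then reads the merge pair off the group's first two entries.
import Mathlib
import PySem

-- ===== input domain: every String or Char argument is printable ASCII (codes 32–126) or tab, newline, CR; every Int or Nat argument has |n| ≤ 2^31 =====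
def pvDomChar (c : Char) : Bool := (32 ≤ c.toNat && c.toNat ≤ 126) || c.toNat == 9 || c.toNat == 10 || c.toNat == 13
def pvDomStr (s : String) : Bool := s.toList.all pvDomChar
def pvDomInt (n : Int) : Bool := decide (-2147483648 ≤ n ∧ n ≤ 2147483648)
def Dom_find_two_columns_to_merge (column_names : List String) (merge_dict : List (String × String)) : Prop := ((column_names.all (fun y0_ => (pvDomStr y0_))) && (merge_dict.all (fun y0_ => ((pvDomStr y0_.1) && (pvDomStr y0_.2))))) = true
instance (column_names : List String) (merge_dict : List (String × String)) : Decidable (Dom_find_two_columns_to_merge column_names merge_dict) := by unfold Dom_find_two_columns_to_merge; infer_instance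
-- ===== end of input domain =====

-- B replaces A's nested scan (per-candidate list-membership test and inner partner scan) by
-- a set for membership and a precomputed index grouping key-columns by their new name,
-- read off in a single scan (objective: alternative).

-- ===== PORT A =====
-- inner loop 'for j in range(i+1, len(column_names))' over the suffix after position i
def aInner (merge_dict : List (String × String)) (col1_new_name : String) : List String → Option String
  | [] => none
  | c :: rs =>
    match merge_dict.lookup c with
    | some col2_new_name =>
        if col2_new_name = col1_new_name then some c else aInner merge_dict col1_new_name rs
    | none => aInner merge_dict col1_new_name rs

-- outer loop 'for i in range(len(column_names))', the suffix from i downward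
def aOuter (column_names : List String) (merge_dict : List (String × String)) : List String → String × String × String
  | [] => ("", "", "")
  | c :: rs =>
    match merge_dict.lookup c with
    | none => aOuter column_names merge_dict rs
    | some col1_new_name =>
      if col1_new_name ∈ column_names then (c, col1_new_name, col1_new_name)
      else
        match aInner merge_dict col1_new_name rs with
        | some c2 => (c, c2, col1_new_name)
        | none => aOuter column_names merge_dict rs

def find_two_columns_to_merge (column_names : List String) (merge_dict : List (String × String)) : String × String × String :=
  aOuter column_names merge_dict column_names

-- ===== PORT B =====
-- pairs = [(merge_dict[c], c) for c in column_names if c in merge_dict]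
def bPairs (column_names : List String) (merge_dict : List (String × String)) : List (String × String) :=
  column_names.filterMap (fun c => (merge_dict.lookup c).map (fun v => (v, c)))

-- groups[new] = groups.get(new, []) + [c]
def bGroups (pairs : List (String × String)) : PySem.Dict String (List String) :=
  pairs.foldl (fun d p => d.modify p.1 [] (· ++ [p.2])) PySem.Dict.empty

def bScan (colset : PySem.Set String) (groups : PySem.Dict String (List String)) : List (String × String) → String × String × String
  | [] => ("", "", "")
  | (new_name, c) :: rest =>
    if colset.contains new_name then (c, new_name, new_name)
    else
      match groups.getD new_name [] with
      | c0 :: c1 :: _ => (c0, c1, new_name)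
      | _ => bScan colset groups rest

def find_two_columns_to_merge_alt (column_names : List String) (merge_dict : List (String × String)) : String × String × String :=
  bScan (PySem.Set.ofList column_names) (bGroups (bPairs column_names merge_dict)) (bPairs column_names merge_dict)

-- ===== PRECONDITION & SPEC =====
def Spec_find_two_columns_to_merge (column_names : List String) (merge_dict : List (String × String)) (out : String × String × String) : Prop := out = find_two_columns_to_merge_alt column_names merge_dict
instance (column_names : List String) (merge_dict : List (String × String)) (out : String × String × String) : Decidable (Spec_find_two_columns_to_merge column_names merge_dict out) := by unfold Spec_find_two_columns_to_merge; infer_instance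

-- ===== CLAIM (what is proved, stated in full; the proofs are below) =====
def Claim_equal_find_two_columns_to_merge : Prop := ∀ (column_names : List String) (merge_dict : List (String × String)), Dom_find_two_columns_to_merge column_names merge_dict → Spec_find_two_columns_to_merge column_names merge_dict (find_two_columns_to_merge column_names merge_dict)

-- ===== LEMMAS AND PROOFS =====

-- the columns whose merge_dict value is `new`, in order
def grp (merge_dict : List (String × String)) (new : String) (cols : List String) : List String :=
  cols.filter (fun c => merge_dict.lookup c == some new)

theorem bPairs_cons_none {c : String} {md : List (String × String)} (cs : List String)
    (h : md.lookup c = none) : bPairs (c :: cs) md = bPairs cs md := by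
  simp [bPairs, h]

theorem bPairs_cons_some {c v : String} {md : List (String × String)} (cs : List String)
    (h : md.lookup c = some v) : bPairs (c :: cs) md = (v, c) :: bPairs cs md := by
  simp [bPairs, h]

theorem grp_append (md : List (String × String)) (new : String) (xs ys : List String) :
    grp md new (xs ++ ys) = grp md new xs ++ grp md new ys := by
  simp [grp, List.filter_append]

theorem grp_singleton_none {c : String} {md : List (String × String)} {new : String}
    (h : md.lookup c = none) : grp md new [c] = [] := by
  simp [grp, h]

theorem grp_singleton_ne {c v : String} {md : List (String × String)} {new : String}
    (h : md.lookup c = some v) (hne : v ≠ new) : grp md new [c] = [] := by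
  simp [grp, h, hne]

theorem aInner_eq_head_grp (md : List (String × String)) (new : String) (rs : List String) :
    aInner md new rs = (grp md new rs).head? := by
  induction rs with
  | nil => rfl
  | cons c rs ih =>
    simp only [aInner, grp, List.filter_cons]
    cases h : md.lookup c with
    | none => simpa [grp] using ih
    | some v =>
      by_cases hv : v = new
      · simp [hv]
      · simpa [hv, grp] using ih

theorem bPairs_grp (cols : List String) (md : List (String × String)) (new : String) :
    ((bPairs cols md).filter (fun p => p.1 == new)).map (·.2) = grp md new cols := by
  induction cols with
  | nil => rfl
  | cons c cs ih =>
    simp only [bPairs, List.filterMap_cons, grp, List.filter_cons] at *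
    cases h : md.lookup c with
    | none => simpa [h] using ih
    | some v =>
      by_cases hv : v = new
      · simpa [h, hv] using ih
      · simpa [h, hv] using ih

theorem bGroups_bPairs_getD (cols : List String) (md : List (String × String)) (new : String) :
    (bGroups (bPairs cols md)).getD new [] = grp md new cols := by
  rw [show (bGroups (bPairs cols md)).getD new [] =
      ((bPairs cols md).filter (fun p => p.1 == new)).map (·.2) from by
    simpa [bGroups] using PySem.Dict.getD_foldl_modify_append (bPairs cols md) PySem.Dict.empty new]
  exact bPairs_grp cols md new

-- the loop invariant: any new-name (not itself a column) whose group meets the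
-- already-passed prefix `pre` has a group of at most one column overall
def MergeInv (cols : List String) (md : List (String × String)) (pre : List String) : Prop :=
  ∀ new, new ∉ cols → grp md new pre ≠ [] → (grp md new cols).length ≤ 1

theorem main_lemma (cols : List String) (md : List (String × String)) :
    ∀ (rest pre : List String), cols = pre ++ rest → MergeInv cols md pre →
      aOuter cols md rest = bScan (PySem.Set.ofList cols) (bGroups (bPairs cols md)) (bPairs rest md) := by
  intro rest
  induction rest with
  | nil => intro pre hsplit hinv; rfl
  | cons c rs ih =>
    intro pre hsplit hinv
    cases h : md.lookup c with
    | none =>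
      rw [bPairs_cons_none rs h]
      simp only [aOuter, h]
      refine ih (pre ++ [c]) (by simpa using hsplit) ?_
      intro new hnm hne
      rw [grp_append, grp_singleton_none h, List.append_nil] at hne
      exact hinv new hnm hne
    | some new =>
      rw [bPairs_cons_some rs h]
      simp only [aOuter, h]
      by_cases hmem : new ∈ cols
      ·         simp [bScan, hmem]
      · have hcontains : (PySem.Set.ofList cols).contains new = false := by
          simp only [← Bool.not_eq_true, PySem.Set.contains_iff, PySem.Set.mem_ofList]
          exact hmem
        have hG : grp md new cols = grp md new pre ++ c :: grp md new rs := by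
          rw [hsplit, grp_append]
          congr 1
          simp [grp, h]
        simp only [bScan, hcontains, Bool.false_eq_true, if_false, if_neg hmem,
          aInner_eq_head_grp, bGroups_bPairs_getD]
        cases hrs : grp md new rs with
        | cons c2 tl =>
          -- a later partner exists: both sides return (c, c2, new)
          have hpre : grp md new pre = [] := by
            by_contra hne
            have := hinv new hmem hne
            rw [hG, hrs] at this
            simp at this
            omega
          rw [hG, hrs, hpre]
          simp
        | nil =>
          -- no later partner: both sides skip c
          have hsmall : (grp md new cols).length ≤ 1 := by
            by_cases hpre : grp md new pre = []
            · rw [hG, hpre, hrs]; simp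
            · exact hinv new hmem hpre
          have hrec := ih (pre ++ [c]) (by simpa using hsplit) ?_
          · rw [← hrec]
            cases hg : grp md new cols with
            | nil => simp
            | cons a tl =>
              cases tl with
              | nil => simp
              | cons b tl' => rw [hg] at hsmall; simp at hsmall
          · intro new' hnm' hne'
            by_cases hnew : new' = new
            · subst hnew; exact hsmall
            · rw [grp_append, grp_singleton_ne h (fun e => hnew e.symm), List.append_nil] at hne'
              exact hinv new' hnm' hne'

-- ===== VERDICT (by name: the statement is the Claim_ definition above) =====
theorem find_two_columns_to_merge_spec : Claim_equal_find_two_columns_to_merge := by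
  intro cols md _
  unfold Spec_find_two_columns_to_merge find_two_columns_to_merge find_two_columns_to_merge_alt
  exact main_lemma cols md cols [] rfl (fun new _ hne => absurd rfl hne)
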